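-- pv_equiv track=rewrite | github.com/cosmic-foundry/cosmic-foundry | scripts/gen_validation_docs.py | _split_cells
-- ===== SOURCE A (Python) =====
-- def _split_cells(source: str) -> list[tuple[str | None, str]]:
--     """Split *source* on `# %%` markers; return (tag, body) pairs."""
--     chunks = source.split("\n# %%")
--     cells = []
--     for chunk in chunks:
--         stripped = chunk.strip()
--         if not stripped or stripped.startswith(('"""', "'''")):
--             continue
--         first_newline = chunk.find("\n")
--         if first_newline == -1:
--             continue
--         tag = chunk[:first_newline].strip() or None
--         body = chunk[first_newline:].strip()
--         if body:
--             cells.append((tag, body))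
--     return cells
-- ===== SOURCE B (Python) =====
-- def _split_cells(source: str) -> list:
--     """One-pass line parser: a new cell starts at every non-first line
--     beginning with '# %%'; A's per-cell rules are then applied."""
--     cells = []
--
--     def flush(cur):
--         head, rest = cur[0], cur[1:]
--         whole = "\n".join(cur).strip()
--         if not whole or whole.startswith('"""') or whole.startswith("'''"):
--             return
--         if not rest:
--             return
--         body = "\n".join(rest).strip()
--         if body:
--             cells.append((head.strip() or None, body))
--
--     lines = source.split("\n")
--     cur = [lines[0]]
--     for line in lines[1:]:
--         if line.startswith("# %%"):
--             flush(cur)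
--             cur = [line[4:]]
--         else:
--             cur.append(line)
--     flush(cur)
--     return cells
-- ===== Notes on version B (the rewrite author's own statement) =====
-- stated objective: alternative
-- what changed: Instead of splitting the whole source on the cell-marker separator and then looping over the chunks, B makes a single pass over the source's lines, accumulating the current cell's lines and flushing a (tag, body) pair at every line that starts a new cell.
import Mathlib
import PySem

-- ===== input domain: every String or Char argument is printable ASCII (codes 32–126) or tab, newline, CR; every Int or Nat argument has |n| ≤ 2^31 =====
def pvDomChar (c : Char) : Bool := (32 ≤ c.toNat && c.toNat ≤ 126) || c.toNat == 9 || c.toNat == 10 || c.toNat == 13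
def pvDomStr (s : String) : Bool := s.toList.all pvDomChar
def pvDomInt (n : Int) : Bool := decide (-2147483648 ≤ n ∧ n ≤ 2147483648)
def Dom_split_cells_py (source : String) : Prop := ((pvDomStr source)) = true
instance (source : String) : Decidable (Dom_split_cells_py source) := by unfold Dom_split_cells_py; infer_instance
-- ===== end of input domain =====

-- B replaces A's split-on-marker-then-loop by a single pass over the source's lines,
-- accumulating each cell's lines and flushing at every cell-marker boundary line
-- (objective: alternative decomposition, same return value).

-- ===== PORT A =====
-- body of A's for-loop over one chunk (strings handled as List Char via PySem.Chars)
def aStep (cells : List (Option String × String)) (chunk : List Char) : List (Option String × String) :=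
  let stripped := PySem.Chars.strip chunk
  if stripped.isEmpty || PySem.Chars.startswith stripped "\"\"\"".toList
      || PySem.Chars.startswith stripped "'''".toList then
    cells
  else
    let fn := PySem.Chars.find chunk "\n".toList
    if fn = -1 then cells
    else
      let tag := PySem.Chars.strip (PySem.Chars.slice chunk none (some fn))
      let body := PySem.Chars.strip (PySem.Chars.slice chunk (some fn) none)
      if body.isEmpty then cells
      else cells ++ [((if tag.isEmpty then none else some (String.ofList tag)), String.ofList body)]

def split_cells_py (source : String) : List (Option String × String) :=
  (PySem.Chars.splitOn source.toList "\n# %%".toList).foldl aStep []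

-- ===== PORT B =====
-- B's flush(cur): emit the accumulated cell (the list of its lines) under the cell rules
def flushB (cells : List (Option String × String)) (cur : List (List Char)) : List (Option String × String) :=
  match cur with
  | [] => cells
  | head :: rest =>
    let whole := PySem.Chars.strip (PySem.Chars.join "\n".toList (head :: rest))
    if whole.isEmpty || PySem.Chars.startswith whole "\"\"\"".toList
        || PySem.Chars.startswith whole "'''".toList then
      cells
    else if rest.isEmpty then cells
    else
      let body := PySem.Chars.strip (PySem.Chars.join "\n".toList rest)
      if body.isEmpty then cells
      else
        let tagS := PySem.Chars.strip head
        cells ++ [((if tagS.isEmpty then none else some (String.ofList tagS)), String.ofList body)]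

-- body of B's for-loop: state = (cells so far, lines of the current cell)
def bStep (st : List (Option String × String) × List (List Char)) (line : List Char) :
    List (Option String × String) × List (List Char) :=
  if PySem.Chars.startswith line "# %%".toList then
    (flushB st.1 st.2, [PySem.Chars.slice line (some 4) none])
  else (st.1, st.2 ++ [line])

def split_cells_py_alt (source : String) : List (Option String × String) :=
  match PySem.Chars.splitOn source.toList "\n".toList with
  | [] => []      -- unreachable: split always yields at least one piece
  | l0 :: ls =>
    let st := ls.foldl bStep ([], [l0])
    flushB st.1 st.2

-- ===== PRECONDITION & SPEC =====
def Spec_split_cells_py (source : String) (out : List (Option String × String)) : Prop := out = split_cells_py_alt source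
instance (source : String) (out : List (Option String × String)) : Decidable (Spec_split_cells_py source out) := by unfold Spec_split_cells_py; infer_instance

-- ===== CLAIM (what is proved, stated in full; the proofs are below) =====
def Claim_equal_split_cells_py : Prop := ∀ (source : String), Dom_split_cells_py source → Spec_split_cells_py source (split_cells_py source)

-- ===== LEMMAS AND PROOFS =====

def mapHead (f : List Char → List Char) : List (List Char) → List (List Char)
  | [] => []
  | h :: t => f h :: t

def splitOnR (s0 : Char) (st : List Char) : List Char → List (List Char)
  | [] => [[]]
  | c :: rest =>
    if (s0 :: st).isPrefixOf (c :: rest) then [] :: splitOnR s0 st (rest.drop st.length)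
    else mapHead (c :: ·) (splitOnR s0 st rest)
termination_by l => l.length
decreasing_by
  · simp only [List.length_drop, List.length_cons]
    omega
  · simp

theorem splitOn_go_spec (s0 : Char) (st : List Char) :
    ∀ (fuel : Nat) (l cur acc : _), l.length < fuel →
      PySem.Chars.splitOn.go (s0 :: st) fuel l cur acc
        = acc.reverse ++ mapHead (cur.reverse ++ ·) (splitOnR s0 st l) := by
  intro fuel
  induction fuel with
  | zero => intro l cur acc h; exact absurd h (Nat.not_lt_zero _)
  | succ n ih =>
    intro l cur acc h
    cases l with
    | nil =>
      rw [PySem.Chars.splitOn.go.eq_def]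
      simp [splitOnR, mapHead]
    | cons c rest =>
      rw [PySem.Chars.splitOn.go.eq_def]
      simp only []
      by_cases hp : (s0 :: st).isPrefixOf (c :: rest)
      · simp only [hp, if_true]
        rw [ih _ _ _ (by simp at h ⊢; omega)]
        rw [splitOnR]
        simp only [hp, if_true, mapHead, List.length_cons, List.drop_succ_cons]
        cases hsr : splitOnR s0 st (List.drop st.length rest) with
        | nil => simp
        | cons a b => simp
      · simp only [hp, Bool.false_eq_true, if_false]
        rw [ih rest (c :: cur) acc (by simp at h ⊢; omega)]
        rw [splitOnR]
        simp only [hp, Bool.false_eq_true, if_false]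
        cases hsr : splitOnR s0 st rest with
        | nil => simp [mapHead]
        | cons a b => simp [mapHead]

theorem splitOn_eq (s0 : Char) (st : List Char) (l : List Char) :
    PySem.Chars.splitOn l (s0 :: st) = splitOnR s0 st l := by
  rw [PySem.Chars.splitOn, splitOn_go_spec s0 st _ _ _ _ (Nat.lt_succ_self _)]
  cases splitOnR s0 st l with
  | nil => simp [mapHead]
  | cons a b => simp [mapHead]

theorem splitOnR_ne_nil (s0 : Char) (st : List Char) (l : List Char) :
    splitOnR s0 st l ≠ [] := by
  induction l using splitOnR.induct s0 st with
  | case1 => simp [splitOnR]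
  | case2 c rest hp ih =>
    rw [splitOnR]
    simp [hp]
  | case3 c rest hp ih =>
    rw [splitOnR]
    simp only [hp, Bool.false_eq_true, if_false]
    cases hsr : splitOnR s0 st rest with
    | nil => exact absurd hsr ih
    | cons a b => simp [mapHead]

def pvMark : List Char := ['#', ' ', '%', '%']

theorem mapHead_mapHead (f g : List Char → List Char) (xs : List (List Char)) :
    mapHead f (mapHead g xs) = mapHead (fun x => f (g x)) xs := by
  cases xs <;> rfl

theorem lines_append (m r : List Char) (hm : '\n' ∉ m) :
    splitOnR '\n' [] (m ++ r) = mapHead (m ++ ·) (splitOnR '\n' [] r) := by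
  induction m with
  | nil =>
    cases h : splitOnR '\n' [] r with
    | nil => exact absurd h (splitOnR_ne_nil _ _ _)
    | cons a b => simp [mapHead]; exact h
  | cons c m' ih =>
    have hc : c ≠ '\n' := fun e => hm (by simp [e])
    rw [List.cons_append, splitOnR]
    have hpre : (['\n'] : List Char).isPrefixOf (c :: (m' ++ r)) = false := by
      simp [List.isPrefixOf]
      exact fun e => (hc e.symm).elim
    simp only [hpre, Bool.false_eq_true, if_false]
    rw [ih (fun hx => hm (List.mem_cons_of_mem _ hx)), mapHead_mapHead]
    cases h : splitOnR '\n' [] r with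
    | nil => exact absurd h (splitOnR_ne_nil _ _ _)
    | cons a b => simp [mapHead]

theorem head_prefix : ∀ (l : List Char) (mark : List Char), '\n' ∉ mark →
    ∀ (h : List Char) (t : List (List Char)), splitOnR '\n' [] l = h :: t →
      mark.isPrefixOf h = mark.isPrefixOf l := by
  intro l
  induction l with
  | nil =>
    intro mark hm h t he
    simp [splitOnR] at he
    rw [he.1.symm]
  | cons c rest ih =>
    intro mark hm h t he
    by_cases hc : c = '\n'
    · subst hc
      rw [splitOnR] at he
      simp [List.isPrefixOf] at he
      cases mark with
      | nil => rfl
      | cons m0 mk =>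
        have hm0 : m0 ≠ '\n' := fun e => hm (by simp [e])
        rw [he.1]
        simp [List.isPrefixOf]
        exact fun e => (hm0 e).elim
    · rw [splitOnR] at he
      have hpre : (['\n'] : List Char).isPrefixOf (c :: rest) = false := by
        simp [List.isPrefixOf]
        exact fun e => (hc e.symm).elim
      simp only [hpre, Bool.false_eq_true, if_false] at he
      cases hr : splitOnR '\n' [] rest with
      | nil => exact absurd hr (splitOnR_ne_nil _ _ _)
      | cons h' t' =>
        rw [hr] at he
        simp [mapHead] at he
        cases mark with
        | nil => rfl
        | cons m0 mk =>
          rw [← he.1]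
          by_cases hmc : m0 = c
          · subst hmc
            simp [List.isPrefixOf]
            exact ih mk (fun hx => hm (List.mem_cons_of_mem _ hx)) h' t' hr
          · have hbe : (m0 == c) = false := by simp [hmc]
            simp [List.isPrefixOf, hbe]

theorem lines_no_newline : ∀ (l : List Char), ∀ x ∈ splitOnR '\n' [] l, '\n' ∉ x := by
  intro l
  induction l with
  | nil => intro x hx; simp [splitOnR] at hx; simp [hx]
  | cons c rest ih =>
    intro x hx
    by_cases hc : c = '\n'
    · subst hc
      rw [splitOnR] at hx
      simp [List.isPrefixOf] at hx
      cases hx with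
      | inl h => simp [h]
      | inr h => exact ih x h
    · rw [splitOnR] at hx
      have hpre : (['\n'] : List Char).isPrefixOf (c :: rest) = false := by
        simp [List.isPrefixOf]
        exact fun e => (hc e.symm).elim
      simp only [hpre, Bool.false_eq_true, if_false] at hx
      cases hr : splitOnR '\n' [] rest with
      | nil => exact absurd hr (splitOnR_ne_nil _ _ _)
      | cons h' t' =>
        rw [hr] at hx
        simp [mapHead] at hx
        cases hx with
        | inl h =>
          subst h
          intro hmem
          cases hmem with
          | head => exact hc rfl
          | tail _ hmem' => exact ih h' (hr ▸ List.mem_cons_self ..) hmem'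
        | inr h => exact ih x (hr ▸ List.mem_cons_of_mem _ h)

def grp (acc : List Char) : List (List Char) → List (List Char)
  | [] => [acc]
  | l :: ls => if pvMark.isPrefixOf l then acc :: grp (l.drop 4) ls else grp (acc ++ '\n' :: l) ls

theorem grp_append (ls : List (List Char)) : ∀ (acc a : List Char),
    grp (a ++ acc) ls = mapHead (a ++ ·) (grp acc ls) := by
  induction ls with
  | nil => intro acc a; simp [grp, mapHead]
  | cons l t ih =>
    intro acc a
    rw [grp, grp]
    by_cases hp : pvMark.isPrefixOf l
    · simp [hp, mapHead]
    · simp only [hp, Bool.false_eq_true, if_false]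
      rw [List.append_assoc] at *
      exact ih (acc ++ '\n' :: l) a

theorem regroup : ∀ (l : List Char) (h : List Char) (t : List (List Char)),
    splitOnR '\n' [] l = h :: t → splitOnR '\n' pvMark l = grp h t := by
  intro l
  induction l using splitOnR.induct '\n' pvMark with
  | case1 =>
    intro h t he
    simp [splitOnR] at he
    obtain ⟨rfl, rfl⟩ := he
    simp [splitOnR, grp]
  | case2 c rest hp ih =>
    intro h t he
    have hp' := hp
    simp only [List.isPrefixOf, Bool.and_eq_true, beq_iff_eq] at hp'
    obtain ⟨hc, hmk⟩ := hp'
    obtain ⟨r', hr'⟩ := List.isPrefixOf_iff_prefix.mp hmk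
    have hdrop : List.drop pvMark.length rest = r' := by rw [← hr']; exact List.drop_left
    rw [hdrop] at ih
    subst hc
    rw [show splitOnR '\n' [] ('\n' :: rest)
          = [] :: splitOnR '\n' [] rest by rw [splitOnR]; simp [List.isPrefixOf]] at he
    rw [← hr', lines_append pvMark r' (by decide)] at he
    cases hlr : splitOnR '\n' [] r' with
    | nil => exact absurd hlr (splitOnR_ne_nil _ _ _)
    | cons h' t' =>
      rw [hlr] at he
      simp only [mapHead] at he
      obtain ⟨he1, he2⟩ := List.cons_eq_cons.mp he
      rw [splitOnR]
      simp only [hp, if_true, hdrop]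
      rw [← he1, ← he2, grp]
      have hpf : pvMark.isPrefixOf (pvMark ++ h') = true :=
        List.isPrefixOf_iff_prefix.mpr (List.prefix_append _ _)
      have hd4 : List.drop 4 (pvMark ++ h') = h' := by simp [pvMark]
      simp only [hpf, if_true, hd4]
      rw [ih h' t' hlr]
  | case3 c rest hp ih =>
    intro h t he
    rw [splitOnR]
    simp only [hp, Bool.false_eq_true, if_false]
    cases hlr : splitOnR '\n' [] rest with
    | nil => exact absurd hlr (splitOnR_ne_nil _ _ _)
    | cons h0 t0 =>
      rw [ih h0 t0 hlr]
      by_cases hc : c = '\n'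
      · subst hc
        have hmk : pvMark.isPrefixOf rest = false := by
          by_contra hx
          simp only [Bool.not_eq_false] at hx
          exact hp (by simp [List.isPrefixOf, hx])
        rw [show splitOnR '\n' [] ('\n' :: rest)
              = [] :: splitOnR '\n' [] rest by rw [splitOnR]; simp [List.isPrefixOf]] at he
        rw [hlr] at he
        obtain ⟨he1, he2⟩ := List.cons_eq_cons.mp he
        rw [← he1, ← he2, grp]
        have hph : pvMark.isPrefixOf h0 = false := by
          rw [head_prefix rest pvMark (by decide) h0 t0 hlr]
          exact hmk
        simp only [hph, Bool.false_eq_true, if_false, List.nil_append]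
        have hga := grp_append t0 h0 ['\n']
        simp only [List.cons_append, List.nil_append] at hga
        rw [hga]
      · rw [show splitOnR '\n' [] (c :: rest)
              = mapHead (c :: ·) (splitOnR '\n' [] rest) by
            rw [splitOnR]
            have hpre : (['\n'] : List Char).isPrefixOf (c :: rest) = false := by
              simp [List.isPrefixOf]
              exact fun e => (hc e.symm).elim
            simp [hpre]] at he
        rw [hlr] at he
        simp only [mapHead] at he
        obtain ⟨he1, he2⟩ := List.cons_eq_cons.mp he
        rw [← he1, ← he2]
        rw [show (c :: h0 : List Char) = [c] ++ h0 by rfl, grp_append t0 h0 [c]]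
        cases grp h0 t0 <;> simp [mapHead]

theorem strip_newline_cons (x : List Char) :
    PySem.Chars.strip ('\n' :: x) = PySem.Chars.strip x := by
  rw [PySem.Chars.strip, PySem.Chars.strip, PySem.Chars.lstrip, PySem.Chars.lstrip,
    List.dropWhile_cons, if_pos (show PySem.Chars.isspace '\n' = true from by decide)]

theorem findgo_newline (r : List Char) : ∀ (h : List Char) (k : Nat), '\n' ∉ h →
    PySem.Chars.find.go ['\n'] (h ++ '\n' :: r) k = (k : Int) + h.length := by
  intro h
  induction h with
  | nil =>
    intro k _
    rw [List.nil_append, PySem.Chars.find.go.eq_def]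
    simp [List.isPrefixOf]
  | cons c h' ih =>
    intro k hm
    have hc : c ≠ '\n' := fun e => hm (by simp [e])
    rw [List.cons_append, PySem.Chars.find.go.eq_def]
    have hpre : (['\n'] : List Char).isPrefixOf (c :: (h' ++ '\n' :: r)) = false := by
      simp [List.isPrefixOf]
      exact fun e => (hc e.symm).elim
    simp only [hpre, Bool.false_eq_true, if_false]
    rw [ih (k + 1) (fun hx => hm (List.mem_cons_of_mem _ hx))]
    simp only [List.length_cons]
    push_cast
    ring

theorem find_newline (h r : List Char) (hh : '\n' ∉ h) :
    PySem.Chars.find (h ++ '\n' :: r) ['\n'] = (h.length : Int) := by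
  rw [PySem.Chars.find, findgo_newline r h 0 hh]
  simp

theorem find_no_newline (h : List Char) (hh : '\n' ∉ h) :
    PySem.Chars.find h ['\n'] = -1 :=
  (PySem.Chars.find_eq_neg_one_iff _ _).mpr (fun hinf => hh (hinf.subset (by simp)))

theorem joinNL_cons (h r0 : List Char) (rs : List (List Char)) :
    PySem.Chars.join ['\n'] (h :: r0 :: rs)
      = h ++ '\n' :: PySem.Chars.join ['\n'] (r0 :: rs) := by
  show List.intercalate ['\n'] (h :: r0 :: rs) = h ++ '\n' :: List.intercalate ['\n'] (r0 :: rs)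
  simp [List.intercalate, List.intersperse]

theorem joinNL_single (h : List Char) : PySem.Chars.join ['\n'] [h] = h := by
  show List.intercalate ['\n'] [h] = h
  simp [List.intercalate, List.intersperse]

theorem flush_eq (cells : List (Option String × String)) (head : List Char)
    (rest : List (List Char)) (hh : '\n' ∉ head) :
    flushB cells (head :: rest) = aStep cells (PySem.Chars.join "\n".toList (head :: rest)) := by
  simp only [flushB, aStep, show ("\n".toList : List Char) = ['\n'] from rfl]
  cases rest with
  | nil =>
    rw [joinNL_single]
    by_cases hcond : ((PySem.Chars.strip head).isEmpty
        || PySem.Chars.startswith (PySem.Chars.strip head) "\"\"\"".toList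
        || PySem.Chars.startswith (PySem.Chars.strip head) "'''".toList) = true
    · rw [if_pos hcond, if_pos hcond]
    · rw [if_neg hcond, if_neg hcond, find_no_newline head hh]
      simp
  | cons r0 rs =>
    by_cases hcond : ((PySem.Chars.strip (PySem.Chars.join ['\n'] (head :: r0 :: rs))).isEmpty
        || PySem.Chars.startswith (PySem.Chars.strip (PySem.Chars.join ['\n'] (head :: r0 :: rs))) "\"\"\"".toList
        || PySem.Chars.startswith (PySem.Chars.strip (PySem.Chars.join ['\n'] (head :: r0 :: rs))) "'''".toList) = true
    · rw [if_pos hcond, if_pos hcond]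
    · rw [if_neg hcond, if_neg hcond]
      rw [joinNL_cons, find_newline head _ hh]
      have hfn : ¬ ((head.length : Int) = -1) := by omega
      rw [if_neg hfn]
      have hslice1 : PySem.Chars.slice (head ++ '\n' :: PySem.Chars.join ['\n'] (r0 :: rs)) none (some (head.length : Int))
          = head := by
        rw [PySem.Chars.slice_eq_listSlice, PySem.List.slice_to _ (by positivity)]
        simp
      have hslice2 : PySem.Chars.slice (head ++ '\n' :: PySem.Chars.join ['\n'] (r0 :: rs)) (some (head.length : Int)) none
          = '\n' :: PySem.Chars.join ['\n'] (r0 :: rs) := by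
        rw [PySem.Chars.slice_eq_listSlice, PySem.List.slice_from _ (by positivity)]
        simp
      rw [hslice1, hslice2, strip_newline_cons]
      simp

theorem joinNL_append_singleton (l : List Char) : ∀ (h0 : List Char) (cur : List (List Char)),
    PySem.Chars.join ['\n'] ((h0 :: cur) ++ [l])
      = PySem.Chars.join ['\n'] (h0 :: cur) ++ '\n' :: l := by
  intro h0 cur
  induction cur generalizing h0 with
  | nil => rw [List.cons_append, List.nil_append, joinNL_cons, joinNL_single, joinNL_single]
  | cons c1 cs ih =>
    rw [List.cons_append, List.cons_append, joinNL_cons h0 c1 (cs ++ [l]),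
      ← List.cons_append, ih c1, joinNL_cons h0 c1 cs, List.append_assoc, List.cons_append]

theorem slice4_drop (l : List Char) :
    PySem.Chars.slice l (some 4) none = List.drop 4 l := by
  rw [PySem.Chars.slice_eq_listSlice, PySem.List.slice_from _ (by norm_num)]
  rfl

theorem loop_eq : ∀ (ls : List (List Char)) (cells : List (Option String × String))
    (h0 : List Char) (cur : List (List Char)),
    '\n' ∉ h0 → (∀ x ∈ cur, '\n' ∉ x) → (∀ x ∈ ls, '\n' ∉ x) →
    flushB (ls.foldl bStep (cells, h0 :: cur)).1 (ls.foldl bStep (cells, h0 :: cur)).2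
      = (grp (PySem.Chars.join "\n".toList (h0 :: cur)) ls).foldl aStep cells := by
  intro ls
  induction ls with
  | nil =>
    intro cells h0 cur hh _ _
    simp only [List.foldl_nil, grp, List.foldl_cons, List.foldl_nil]
    exact flush_eq cells h0 cur hh
  | cons l t ih =>
    intro cells h0 cur hh hcur hls
    have hl : '\n' ∉ l := hls l (List.mem_cons_self ..)
    have ht : ∀ x ∈ t, '\n' ∉ x := fun x hx => hls x (List.mem_cons_of_mem _ hx)
    simp only [List.foldl_cons]
    rw [grp]
    by_cases hp : pvMark.isPrefixOf l
    · have hbs : bStep (cells, h0 :: cur) l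
          = (flushB cells (h0 :: cur), [List.drop 4 l]) := by
        rw [bStep, if_pos (show PySem.Chars.startswith l "# %%".toList = true from hp), slice4_drop]
      rw [hbs, if_pos hp, List.foldl_cons]
      have hdl : '\n' ∉ List.drop 4 l := fun hx => hl ((List.drop_subset _ _) hx)
      have hih := ih (aStep cells (PySem.Chars.join "\n".toList (h0 :: cur)))
        (List.drop 4 l) [] hdl (by simp) ht
      rw [show PySem.Chars.join "\n".toList [List.drop 4 l] = List.drop 4 l from joinNL_single _] at hih
      rw [flush_eq cells h0 cur hh]
      exact hih
    · have hbs : bStep (cells, h0 :: cur) l = (cells, (h0 :: cur) ++ [l]) := by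
        rw [bStep, if_neg (show ¬ PySem.Chars.startswith l "# %%".toList = true from hp)]
      rw [hbs, if_neg hp]
      have hcur' : ∀ x ∈ cur ++ [l], '\n' ∉ x := by
        intro x hx
        rcases List.mem_append.mp hx with h | h
        · exact hcur x h
        · simp at h; rw [h]; exact hl
      have hih := ih cells h0 (cur ++ [l]) hh hcur' ht
      rw [List.cons_append, hih, show PySem.Chars.join "\n".toList (h0 :: (cur ++ [l]))
            = PySem.Chars.join "\n".toList (h0 :: cur) ++ '\n' :: l from joinNL_append_singleton l h0 cur]

-- ===== VERDICT (by name: the statement is the Claim_ definition above) =====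
theorem split_cells_py_spec : Claim_equal_split_cells_py := by
  intro source _
  unfold Spec_split_cells_py split_cells_py split_cells_py_alt
  rw [show ("\n# %%".toList : List Char) = '\n' :: pvMark from rfl, splitOn_eq]
  rw [show ("\n".toList : List Char) = ('\n' :: ([] : List Char)) from rfl, splitOn_eq]
  cases hl : splitOnR '\n' [] source.toList with
  | nil => exact absurd hl (splitOnR_ne_nil _ _ _)
  | cons l0 ls =>
    rw [regroup source.toList l0 ls hl]
    have h0 : '\n' ∉ l0 := lines_no_newline source.toList l0 (hl ▸ List.mem_cons_self ..)
    have hs : ∀ x ∈ ls, '\n' ∉ x :=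
      fun x hx => lines_no_newline source.toList x (hl ▸ List.mem_cons_of_mem _ hx)
    have hle := loop_eq ls [] l0 [] h0 (by simp) hs
    rw [show PySem.Chars.join "\n".toList [l0] = l0 from joinNL_single l0] at hle
    exact hle.symm
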